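-- pv_equiv track=rewrite | github.com/karel1980/beldefpuz2021 | 26/analyse.py | create_ciphertext
-- ===== SOURCE A (Python) =====
-- def create_ciphertext(patterns):
--     ALPHABET = 'ABCDEFGHIJKLMNOPQRSTUVWXYZ#'
--
--     idx = 0
--
--     pattern_map = dict()
--
--     for p in patterns:
--         if p not in pattern_map:
--             pattern_map[p] = ALPHABET[idx]
--             idx += 1
--
--     result = ""
--     for p in patterns:
--         result += pattern_map[p]
--
--     return result
-- ===== SOURCE B (Python) =====
-- def create_ciphertext(patterns):
--     ALPHABET = 'ABCDEFGHIJKLMNOPQRSTUVWXYZ#'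
--     pattern_map = {}
--     idx = 0
--     out = []
--     for p in patterns:
--         c = pattern_map.get(p)
--         if c is None:
--             c = ALPHABET[idx]
--             pattern_map[p] = c
--             idx += 1
--         out.append(c)
--     return "".join(out)
-- ===== Notes on version B (the rewrite author's own statement) =====
-- stated objective: simpler
-- what changed: Fuses map-building and translation into a single pass that assigns a letter on first sight and appends the letter immediately into a list joined at the end, instead of building the whole map in one loop and re-scanning the input with string concatenation in a second loop.
import Mathlib
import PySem

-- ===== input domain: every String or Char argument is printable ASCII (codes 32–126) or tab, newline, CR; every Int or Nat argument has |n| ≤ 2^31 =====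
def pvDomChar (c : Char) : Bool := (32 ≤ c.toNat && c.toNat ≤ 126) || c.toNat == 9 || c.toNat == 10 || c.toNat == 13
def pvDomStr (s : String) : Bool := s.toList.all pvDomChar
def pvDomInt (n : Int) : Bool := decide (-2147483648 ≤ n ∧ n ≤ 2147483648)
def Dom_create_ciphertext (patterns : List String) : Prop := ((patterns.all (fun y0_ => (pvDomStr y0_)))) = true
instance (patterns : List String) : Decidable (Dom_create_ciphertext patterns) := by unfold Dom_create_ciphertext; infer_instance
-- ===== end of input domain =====

-- B fuses A's two loops into one pass (assign letter on first sight, emit immediately, join at end); return values agree on Pre_.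

-- ===== PORT A =====
def pvAlphabet : List Char := "ABCDEFGHIJKLMNOPQRSTUVWXYZ#".toList

-- first loop of A: state (idx, pattern_map); pattern_map[p] = ALPHABET[idx] then idx += 1
def pvStepA (st : Int × PySem.Dict String Char) (p : String) : Int × PySem.Dict String Char :=
  if st.2.contains p then st
  else (st.1 + 1, st.2.insert p (PySem.List.pyGetD pvAlphabet st.1 ' '))

def create_ciphertext (patterns : List String) : String :=
  let st := patterns.foldl pvStepA (0, PySem.Dict.empty)
  -- second loop: result += pattern_map[p]  (every p is a key of the map built above)
  String.mk (patterns.foldl (fun acc p => acc ++ [st.2.getD p ' ']) [])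

-- ===== PORT B =====
-- single pass: look p up; on a miss assign ALPHABET[idx] and advance idx; append the letter
def pvGoB : List String → Int → PySem.Dict String Char → List Char → List Char
  | [], _, _, acc => acc
  | p :: ps, idx, m, acc =>
    match m.get? p with
    | some c => pvGoB ps idx m (acc ++ [c])
    | none =>
        let c := PySem.List.pyGetD pvAlphabet idx ' '
        pvGoB ps (idx + 1) (m.insert p c) (acc ++ [c])

def create_ciphertext_alt (patterns : List String) : String :=
  String.mk (pvGoB patterns 0 PySem.Dict.empty [])

-- ===== PRECONDITION & SPEC =====
-- Pre_ excludes inputs with more than 27 distinct patterns, on which A raises IndexError (ALPHABET[27]).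
def Pre_create_ciphertext (patterns : List String) : Prop :=
  (PySem.Set.ofList patterns).length ≤ 27
instance (patterns : List String) : Decidable (Pre_create_ciphertext patterns) := by
  unfold Pre_create_ciphertext; infer_instance
def pvWitness_create_ciphertext : List String := ["a", "b", "a", "c", "b"]

def Spec_create_ciphertext (patterns : List String) (out : String) : Prop := out = create_ciphertext_alt patterns
instance (patterns : List String) (out : String) : Decidable (Spec_create_ciphertext patterns out) := by unfold Spec_create_ciphertext; infer_instance

-- ===== CLAIM (what is proved, stated in full; the proofs are below) =====
def Claim_equal_create_ciphertext : Prop := ∀ (patterns : List String), Dom_create_ciphertext patterns → Pre_create_ciphertext patterns → Spec_create_ciphertext patterns (create_ciphertext patterns)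

-- ===== LEMMAS AND PROOFS =====

-- A's building loop never changes an existing binding
theorem pvBuild_preserve (ps : List String) (st : Int × PySem.Dict String Char)
    (k : String) (v : Char) (h : st.2.get? k = some v) :
    (ps.foldl pvStepA st).2.get? k = some v := by
  induction ps generalizing st with
  | nil => exact h
  | cons p ps ih =>
    refine ih _ ?_
    unfold pvStepA
    split
    · exact h
    · next hc =>
      have hne : k ≠ p := by
        intro he; subst he
        rw [PySem.Dict.contains_eq_isSome_get?, h] at hc
        simp at hc
      simpa [PySem.Dict.get?_insert_of_ne _ _ hne] using h

-- B's single pass emits, for each pattern, its binding in A's final map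
theorem pvGoB_eq (ps : List String) (idx : Int) (m : PySem.Dict String Char) (acc : List Char) :
    pvGoB ps idx m acc =
      acc ++ ps.map (fun p => (ps.foldl pvStepA (idx, m)).2.getD p ' ') := by
  induction ps generalizing idx m acc with
  | nil => simp [pvGoB]
  | cons p ps ih =>
    rcases h : m.get? p with _ | c
    · have hc : m.contains p = false := by
        rw [PySem.Dict.contains_eq_isSome_get?, h]; rfl
      have hstep : pvStepA (idx, m) p
          = (idx + 1, m.insert p (PySem.List.pyGetD pvAlphabet idx ' ')) := by
        simp [pvStepA, hc]
      have hpres := pvBuild_preserve ps (idx + 1, m.insert p (PySem.List.pyGetD pvAlphabet idx ' '))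
        p (PySem.List.pyGetD pvAlphabet idx ' ') (by simp [PySem.Dict.get?_insert_self])
      simp only [pvGoB, h, List.foldl_cons, hstep, List.map_cons, ih,
        PySem.Dict.getD_eq_get?_getD, hpres, List.append_assoc, List.cons_append,
        List.nil_append, Option.getD_some]
    · have hc : m.contains p = true := by
        rw [PySem.Dict.contains_eq_isSome_get?, h]; rfl
      have hstep : pvStepA (idx, m) p = (idx, m) := by simp [pvStepA, hc]
      have hpres := pvBuild_preserve ps (idx, m) p c h
      simp only [pvGoB, h, List.foldl_cons, hstep, List.map_cons, ih,
        PySem.Dict.getD_eq_get?_getD, hpres, List.append_assoc, List.cons_append,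
        List.nil_append, Option.getD_some]

-- ===== VERDICT (by name: the statement is the Claim_ definition above) =====
theorem create_ciphertext_spec : Claim_equal_create_ciphertext := by
  intro patterns _ _
  unfold Spec_create_ciphertext create_ciphertext create_ciphertext_alt
  show String.mk (patterns.foldl
      (fun acc p => acc ++ [(patterns.foldl pvStepA (0, PySem.Dict.empty)).2.getD p ' ']) []) = _
  rw [pvGoB_eq, PySem.List.foldl_append_singleton_eq_map]
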